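-- pv_equiv track=rewrite | github.com/grant-sam03/PokerVision | PokerVision/poker_tracker.py | determine_3bet_opportunity
-- ===== SOURCE A (Python) =====
-- def determine_3bet_opportunity(preflop_text):
--     """
--     Determine if hero had the opportunity to 3-bet.
--     Returns 1 if yes, 0 if no.
--     """
--     # First check if Hero has KK
--     has_kk = False
--     for line in preflop_text.split('\n'):
--         if "Dealt to Hero" in line and "K" in line:
--             # Check if both cards are kings
--             cards = line[line.find("[")+1:line.find("]")].split()
--             if len(cards) == 2 and cards[0][0] == 'K' and cards[1][0] == 'K':
--                 has_kk = True
--                 break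
--
--     if not preflop_text:
--         return 0
--
--     lines = preflop_text.split('\n')
--     preflop_start = False
--     action_lines = []
--
--     # Get all preflop action lines
--     for line in lines:
--         if "*** HOLE CARDS ***" in line:
--             preflop_start = True
--             continue
--         if "*** FLOP ***" in line or "*** SUMMARY ***" in line:
--             break
--         if preflop_start and ": " in line and not line.lower().startswith("dealt to"):
--             action_lines.append(line.strip().lower())
--
--     # Track number of raises before hero's turn
--     raise_count = 0
--     for line in action_lines:
--         if line.startswith("hero:"):
--             break  # Stop when we reach Hero's action
--         if "raises" in line:
--             raise_count += 1
--             if raise_count > 1: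
--                 return 0  # More than one raise, not a 3bet opportunity
--
--     # If we didn't see exactly one raise, it's not a 3bet opportunity
--     if raise_count != 1:
--         return 0
--
--     return 1
-- ===== SOURCE B (Python) =====
-- def determine_3bet_opportunity(preflop_text):
--     """
--     Determine if hero had the opportunity to 3-bet.
--     Returns 1 if yes, 0 if no.
--     Single-pass state machine over the lines: enter the preflop section at
--     the HOLE CARDS marker, stop at a FLOP/SUMMARY marker or at Hero's first
--     action, counting the raises seen along the way.
--     """
--     in_preflop = False
--     raises = 0
--     for line in preflop_text.split('\n'):
--         if "*** HOLE CARDS ***" in line: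
--             in_preflop = True
--         elif "*** FLOP ***" in line or "*** SUMMARY ***" in line:
--             break
--         elif in_preflop and ": " in line and not line.lower().startswith("dealt to"):
--             action = line.strip().lower()
--             if action.startswith("hero:"):
--                 break
--             if "raises" in action:
--                 raises += 1
--     return 1 if raises == 1 else 0
-- ===== Notes on version B (the rewrite author's own statement) =====
-- stated objective: simpler
-- what changed: Replaces A's staged passes (a dead has_kk scan, a collect-action-lines pass building an intermediate list, then a separate counting pass with early returns) by one fused state-machine pass over the lines that counts raises directly with no intermediate list and no dead code.
import Mathlib
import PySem

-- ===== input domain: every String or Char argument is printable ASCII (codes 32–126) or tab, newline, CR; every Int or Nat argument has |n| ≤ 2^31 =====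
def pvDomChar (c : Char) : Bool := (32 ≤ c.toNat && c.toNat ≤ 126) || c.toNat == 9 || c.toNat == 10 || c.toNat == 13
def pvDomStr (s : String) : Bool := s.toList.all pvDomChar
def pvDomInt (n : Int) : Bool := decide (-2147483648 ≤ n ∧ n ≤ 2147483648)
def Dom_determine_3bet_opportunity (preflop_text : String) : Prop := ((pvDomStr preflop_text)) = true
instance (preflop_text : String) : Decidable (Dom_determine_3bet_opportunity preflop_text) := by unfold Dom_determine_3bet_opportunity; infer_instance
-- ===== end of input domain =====

-- B fuses A's two staged passes (collect action lines, then count) into one state-machine pass with no intermediate list and drops A's dead has_kk scan; equal return value (simpler decomposition, not faster).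

-- shared line predicates (the string tests both Python versions perform verbatim)
def pvHCb (l : String) : Bool := PySem.Str.isIn "*** HOLE CARDS ***" l
def pvRawBrk (l : String) : Bool := PySem.Str.isIn "*** FLOP ***" l || PySem.Str.isIn "*** SUMMARY ***" l
def pvDealt (l : String) : Bool := PySem.Str.startswith (PySem.Str.lower l) "dealt to"
def pvNorm (l : String) : String := PySem.Str.lower (PySem.Str.strip l)
def pvHero (l : String) : Bool := PySem.Str.startswith l "hero:"
def pvRaisesIn (l : String) : Bool := PySem.Str.isIn "raises" l

-- ===== PORT A =====
-- A's dead `has_kk` scan, transliterated (its value is computed and discarded, as in A)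
def pvHasKK : List String → Bool
  | [] => false
  | l :: ls =>
    if PySem.Str.isIn "Dealt to Hero" l && PySem.Str.isIn "K" l then
      let cards := PySem.Str.split₀ (PySem.Str.slice l (some (PySem.Str.find l "[" + 1)) (some (PySem.Str.find l "]")))
      if cards.length == 2 &&
         ((PySem.List.pyGet? cards 0).bind (fun c => PySem.Str.pyGet? c 0) == some 'K') &&
         ((PySem.List.pyGet? cards 1).bind (fun c => PySem.Str.pyGet? c 0) == some 'K')
      then true else pvHasKK ls
    else pvHasKK ls

-- A's first loop: flag `preflop_start`, continue on the HOLE CARDS marker, break on FLOP/SUMMARY, collect stripped-lowered action lines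
def pvACollect (started : Bool) : List String → List String
  | [] => []
  | l :: ls =>
    if pvHCb l then pvACollect true ls
    else if pvRawBrk l then []
    else if started && (PySem.Str.isIn ": " l && !pvDealt l) then pvNorm l :: pvACollect started ls
    else pvACollect started ls

-- A's second loop: count raises, break at hero, early return 0 past one raise; then the post-loop check
def pvALoop (cnt : Int) : List String → Int
  | [] => if cnt ≠ 1 then 0 else 1
  | l :: ls =>
    if pvHero l then (if cnt ≠ 1 then 0 else 1)
    else if pvRaisesIn l then (if cnt + 1 > 1 then 0 else pvALoop (cnt + 1) ls)
    else pvALoop cnt ls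

def determine_3bet_opportunity (preflop_text : String) : Int :=
  let _has_kk := pvHasKK ((PySem.Str.split? preflop_text "\n").getD [])
  if preflop_text = "" then 0
  else pvALoop 0 (pvACollect false ((PySem.Str.split? preflop_text "\n").getD []))

-- ===== PORT B =====
-- Source B's single pass: state (in_preflop, raises); break on a terminator or Hero's action; final compare
def pvBLoop (inpf : Bool) (raises : Int) : List String → Int
  | [] => if raises = 1 then 1 else 0
  | l :: ls =>
    if pvHCb l then pvBLoop true raises ls
    else if pvRawBrk l then (if raises = 1 then 1 else 0)
    else if inpf && (PySem.Str.isIn ": " l && !pvDealt l) then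
      let action := pvNorm l
      if pvHero action then (if raises = 1 then 1 else 0)
      else if pvRaisesIn action then pvBLoop inpf (raises + 1) ls
      else pvBLoop inpf raises ls
    else pvBLoop inpf raises ls

def determine_3bet_opportunity_alt (preflop_text : String) : Int :=
  pvBLoop false 0 ((PySem.Str.split? preflop_text "\n").getD [])

-- ===== PRECONDITION & SPEC =====
def Spec_determine_3bet_opportunity (preflop_text : String) (out : Int) : Prop := out = determine_3bet_opportunity_alt preflop_text
instance (preflop_text : String) (out : Int) : Decidable (Spec_determine_3bet_opportunity preflop_text out) := by unfold Spec_determine_3bet_opportunity; infer_instance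

-- ===== CLAIM (what is proved, stated in full; the proofs are below) =====
def Claim_equal_determine_3bet_opportunity : Prop := ∀ (preflop_text : String), Dom_determine_3bet_opportunity preflop_text → Spec_determine_3bet_opportunity preflop_text (determine_3bet_opportunity preflop_text)

-- ===== LEMMAS AND PROOFS =====

-- once the count is ≥ 2 it never comes back, so B's final compare yields 0
theorem pvB_ge2 : ∀ (L : List String) (s : Bool) (cnt : Int), 2 ≤ cnt → pvBLoop s cnt L = 0 := by
  intro L
  induction L with
  | nil => intro s cnt h; simp only [pvBLoop]; split_ifs <;> omega
  | cons l ls ih =>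
    intro s cnt h
    simp only [pvBLoop]
    split_ifs <;> first | omega | exact ih _ _ h | exact ih _ _ (by omega)

-- A's count loop over A's collected list equals B's fused pass, for any start flag and count in {0,1}
theorem pv_AB : ∀ (L : List String) (s : Bool) (cnt : Int), 0 ≤ cnt → cnt ≤ 1 →
    pvALoop cnt (pvACollect s L) = pvBLoop s cnt L := by
  intro L
  induction L with
  | nil =>
    intro s cnt _ _
    simp only [pvACollect, pvALoop, pvBLoop]; split_ifs <;> omega
  | cons l ls ih =>
    intro s cnt h0 h1
    by_cases hc : pvHCb l
    · simp only [pvACollect, pvBLoop, hc, if_true]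
      exact ih true cnt h0 h1
    · by_cases hb : pvRawBrk l
      · simp only [pvACollect, pvBLoop, pvALoop, hc, hb, Bool.false_eq_true, if_false, if_true]
        split_ifs <;> omega
      · by_cases ha : s && (PySem.Str.isIn ": " l && !pvDealt l)
        · simp only [pvACollect, pvBLoop, hc, hb, ha, Bool.false_eq_true, if_false, if_true]
          by_cases hh : pvHero (pvNorm l)
          · simp only [pvALoop, hh, if_true]; split_ifs <;> omega
          · by_cases hr : pvRaisesIn (pvNorm l)
            · simp only [pvALoop, hh, hr, Bool.false_eq_true, if_false, if_true]
              by_cases hcnt : cnt + 1 > 1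
              · rw [if_pos hcnt, pvB_ge2 ls s (cnt + 1) (by omega)]
              · rw [if_neg hcnt]
                exact ih s (cnt + 1) (by omega) (by omega)
            · simp only [pvALoop, hh, hr, Bool.false_eq_true, if_false]
              exact ih s cnt h0 h1
        · simp only [pvACollect, pvBLoop, hc, hb, ha, Bool.false_eq_true, if_false]
          exact ih s cnt h0 h1

-- ===== VERDICT (by name: the statement is the Claim_ definition above) =====
theorem determine_3bet_opportunity_spec : Claim_equal_determine_3bet_opportunity := by
  intro t _
  unfold Spec_determine_3bet_opportunity determine_3bet_opportunity determine_3bet_opportunity_alt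
  by_cases h : t = ""
  · subst h; decide
  · simp only [if_neg h]
    exact pv_AB _ false 0 le_rfl (by omega)
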